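-- pv_equiv track=rewrite | github.com/ayukyo/alltoolkit | Python/checksum_utils/mod.py | fletcher64
-- ===== SOURCE A (Python) =====
-- from typing import Union, Optional
--
-- def fletcher64(data: Union[bytes, str]) -> int:
--     """
--     计算 Fletcher-64 校验和
--
--     Args:
--         data: 输入数据
--
--     Returns:
--         64 位校验和
--     """
--     if isinstance(data, str):
--         data = data.encode('utf-8')
--
--     # 处理为 32 位字
--     words = []
--     for i in range(0, len(data), 4):
--         word = 0
--         for j in range(4):
--             if i + j < len(data):
--                 word |= data[i + j] << (j * 8)
--         words.append(word)
--
--     sum1 = 0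
--     sum2 = 0
--     mod = 0xFFFFFFFF
--
--     for word in words:
--         sum1 = (sum1 + word) % mod
--         sum2 = (sum2 + sum1) % mod
--
--     return (sum2 << 32) | sum1
-- ===== SOURCE B (Python) =====
-- from typing import Union
--
--
-- def fletcher64(data: Union[bytes, str]) -> int:
--     if isinstance(data, str):
--         data = data.encode('utf-8')
--     words = [int.from_bytes(data[i:i + 4], 'little') for i in range(0, len(data), 4)]
--     mod = 0xFFFFFFFF
--     n = len(words)
--     sum1 = sum(words) % mod
--     sum2 = sum((n - i) * w for i, w in enumerate(words)) % mod
--     return (sum2 << 32) | sum1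
-- ===== Notes on version B (the rewrite author's own statement) =====
-- stated objective: simpler
-- what changed: Replaces the coupled sequential (sum1,sum2) running-sum recurrence with two direct closed-form sums (sum of words and a (n-i)-weighted sum, each reduced mod 0xFFFFFFFF once), and builds each little-endian word with int.from_bytes on a 4-byte slice instead of guarded bit-or shifts.
import Mathlib
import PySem

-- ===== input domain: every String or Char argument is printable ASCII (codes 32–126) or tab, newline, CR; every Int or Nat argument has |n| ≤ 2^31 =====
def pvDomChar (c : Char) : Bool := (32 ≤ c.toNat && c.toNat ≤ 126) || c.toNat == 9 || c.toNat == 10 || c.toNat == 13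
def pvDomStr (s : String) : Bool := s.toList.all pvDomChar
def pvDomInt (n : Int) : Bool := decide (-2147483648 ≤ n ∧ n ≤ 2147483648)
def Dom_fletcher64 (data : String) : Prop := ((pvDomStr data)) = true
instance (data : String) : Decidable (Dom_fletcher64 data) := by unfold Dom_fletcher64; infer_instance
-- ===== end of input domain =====

-- B replaces A's coupled (sum1, sum2) running-sum loop by two direct sums (a plain sum and a
-- closed-form weighted sum), and builds each little-endian word from a 4-byte slice instead of
-- bit-or-ing guarded shifts; objective: simpler.

-- data.encode('utf-8'): exact on the ASCII domain Dom_fletcher64 (every char is one byte = its code)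
def pvBytes (data : String) : List Nat := data.toList.map Char.toNat

-- ===== PORT A =====
-- inner loop 'for j in range(4): if i+j < len: word |= data[i+j] << (j*8)' (j ∈ [0,3] nonneg, so j.toNat is exact)
def pvWordA (bs : List Nat) (i : Int) : Nat :=
  (PySem.List.pyRange 0 4 1).foldl
    (fun word j =>
      if i + j < (bs.length : Int) then word ||| (PySem.List.pyGetD bs (i + j) 0 <<< (j.toNat * 8))
      else word) 0

def fletcher64 (data : String) : Int :=
  let bs := pvBytes data
  let words := (PySem.List.pyRange 0 (bs.length : Int) 4).foldl (fun ws i => ws ++ [pvWordA bs i]) []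
  let s := words.foldl
    (fun (p : Nat × Nat) word =>
      ((p.1 + word) % 4294967295, (p.2 + (p.1 + word) % 4294967295) % 4294967295)) (0, 0)
  (((s.2 <<< 32) ||| s.1 : Nat) : Int)

-- ===== PORT B =====
-- int.from_bytes(data[i:i+4], 'little')
def pvWordB (bs : List Nat) (i : Int) : Nat :=
  (PySem.List.slice bs (some i) (some (i + 4))).foldr (fun b acc => acc * 256 + b) 0

-- enumerate indices are nonneg, so p.1.toNat is exact, and n - p.1.toNat never truncates
def fletcher64_alt (data : String) : Int :=
  let bs := pvBytes data
  let words := (PySem.List.pyRange 0 (bs.length : Int) 4).map (fun i => pvWordB bs i)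
  let n := words.length
  let sum1 := (words.foldl (· + ·) 0) % 4294967295
  let sum2 := ((PySem.List.enumerate words 0).foldl (fun a p => a + (n - p.1.toNat) * p.2) 0) % 4294967295
  (((sum2 <<< 32) ||| sum1 : Nat) : Int)

-- ===== PRECONDITION & SPEC =====
def Spec_fletcher64 (data : String) (out : Int) : Prop := out = fletcher64_alt data
instance (data : String) (out : Int) : Decidable (Spec_fletcher64 data out) := by unfold Spec_fletcher64; infer_instance

-- ===== CLAIM (what is proved, stated in full; the proofs are below) =====
def Claim_equal_fletcher64 : Prop := ∀ (data : String), Dom_fletcher64 data → Spec_fletcher64 data (fletcher64 data)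

-- ===== LEMMAS AND PROOFS =====

-- weighted sum Σ (n - i) * w_i, recursively from the left
def pvW : List Nat → Nat
  | [] => 0
  | w :: t => (t.length + 1) * w + pvW t

theorem pv_or (x y k : Nat) (h : x < 2 ^ k) : x ||| y <<< k = y * 2 ^ k + x := by
  rw [Nat.lor_comm, ← Nat.shiftLeft_add_eq_or_of_lt h, Nat.shiftLeft_eq]

-- A's guarded-or word builder equals the little-endian value of the first four bytes
theorem pv_chunk (l : List Nat) (hb : ∀ x ∈ l, x < 256) :
    (let t0 := if 0 < l.length then 0 ||| (l.getD 0 0 <<< 0) else 0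
     let t1 := if 1 < l.length then t0 ||| (l.getD 1 0 <<< 8) else t0
     let t2 := if 2 < l.length then t1 ||| (l.getD 2 0 <<< 16) else t1
     if 3 < l.length then t2 ||| (l.getD 3 0 <<< 24) else t2)
    = (l.take 4).foldr (fun b acc => acc * 256 + b) 0 := by
  match l, hb with
  | [], _ => simp
  | [a], hb => simp [List.getD]
  | [a, b], hb =>
    have h1 : a < 256 := hb a (by simp)
    have h2 : b < 256 := hb b (by simp)
    simp only [List.length_cons, List.getD, List.take, List.foldr]
    norm_num
    rw [pv_or a b 8 (by norm_num; omega)]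
    ring
  | [a, b, c], hb =>
    have h1 : a < 256 := hb a (by simp)
    have h2 : b < 256 := hb b (by simp)
    have h3 : c < 256 := hb c (by simp)
    simp only [List.length_cons, List.getD, List.take, List.foldr]
    norm_num
    rw [pv_or a b 8 (by norm_num; omega), pv_or _ c 16 (by norm_num; omega)]
    ring
  | a :: b :: c :: d :: t, hb =>
    have h1 : a < 256 := hb a (by simp)
    have h2 : b < 256 := hb b (by simp)
    have h3 : c < 256 := hb c (by simp)
    have h4 : d < 256 := hb d (by simp)
    simp only [List.length_cons, List.getD, List.take, List.foldr]
    norm_num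
    rw [pv_or a b 8 (by norm_num; omega), pv_or _ c 16 (by norm_num; omega),
      pv_or _ d 24 (by norm_num; omega)]
    ring

theorem pv_word_eq (bs : List Nat) (hb : ∀ x ∈ bs, x < 256) (i : Int)
    (h0 : 0 ≤ i) (hi : i < (bs.length : Int)) : pvWordA bs i = pvWordB bs i := by
  obtain ⟨k, rfl⟩ : ∃ k : Nat, i = (k : Int) := ⟨i.toNat, (Int.toNat_of_nonneg h0).symm⟩
  have hk : k < bs.length := by exact_mod_cast hi
  unfold pvWordA pvWordB
  rw [show PySem.List.pyRange 0 4 1 = [0, 1, 2, 3] from by decide]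
  simp only [List.foldl_cons, List.foldl_nil]
  rw [PySem.List.slice_toNat bs (show (0 : Int) ≤ (k : Int) by omega)
    (show (0 : Int) ≤ (k : Int) + 4 by omega)]
  have hguard : ∀ j : Int, 0 ≤ j →
      (((k : Int) + j < (bs.length : Int)) ↔ (j.toNat < (bs.drop k).length)) := by
    intro j hj; simp [List.length_drop]; omega
  have hget : ∀ j : Int, 0 ≤ j →
      PySem.List.pyGetD bs ((k : Int) + j) 0 = (bs.drop k).getD j.toNat 0 := by
    intro j hj
    rw [PySem.List.pyGetD_of_nonneg _ _ (by omega),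
      show ((k : Int) + j).toNat = k + j.toNat from by omega]
    simp only [List.getD_eq_getElem?_getD, List.getElem?_drop]
  have h4 : ((k : Int) + 4).toNat - ((k : Int)).toNat = 4 := by omega
  rw [h4, Int.toNat_natCast]
  simp only [hguard 0 (by norm_num), hguard 1 (by norm_num), hguard 2 (by norm_num),
    hguard 3 (by norm_num), hget 0 (by norm_num), hget 1 (by norm_num), hget 2 (by norm_num),
    hget 3 (by norm_num)]
  exact pv_chunk (bs.drop k) (fun x hx => hb x (List.mem_of_mem_drop hx))

theorem pv_foldl_add (t : List Nat) (c : Nat) : t.foldl (· + ·) c = c + t.foldl (· + ·) 0 := by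
  induction t generalizing c with
  | nil => simp
  | cons w t ih => simp only [List.foldl_cons]; rw [ih (c + w), ih (0 + w)]; omega

-- B's enumerate-weighted sum computes pvW
theorem pv_enumW (ws : List Nat) (s a nw : Nat) (h : nw = s + ws.length) :
    (PySem.List.enumerate ws (s : Int)).foldl (fun a p => a + (nw - p.1.toNat) * p.2) a
      = a + pvW ws := by
  induction ws generalizing s a with
  | nil => simp [PySem.List.enumerate_nil, pvW]
  | cons w t ih =>
    rw [PySem.List.enumerate_cons]
    simp only [List.foldl_cons]
    have hc : ((s : Int) + 1) = ((s + 1 : Nat) : Int) := by push_cast; ring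
    rw [hc, ih (s + 1) _ (by simp at h ⊢; omega)]
    simp only [pvW, Int.toNat_natCast]
    have hw : nw - s = t.length + 1 := by simp at h; omega
    rw [hw]; ring

-- A's coupled running-sum loop in closed form: a plain sum and the weighted sum pvW, each mod M
theorem pv_fold_pair (ws : List Nat) (a b : Nat) (ha : a < 4294967295) (hb : b < 4294967295) :
    ws.foldl (fun (p : Nat × Nat) word =>
        ((p.1 + word) % 4294967295, (p.2 + (p.1 + word) % 4294967295) % 4294967295)) (a, b)
      = ((a + ws.foldl (· + ·) 0) % 4294967295,
         (b + ws.length * a + pvW ws) % 4294967295) := by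
  induction ws generalizing a b with
  | nil => simp [pvW, Nat.mod_eq_of_lt ha, Nat.mod_eq_of_lt hb]
  | cons w t ih =>
    simp only [List.foldl_cons]
    rw [ih _ _ (Nat.mod_lt _ (by norm_num)) (Nat.mod_lt _ (by norm_num))]
    simp only [Prod.mk.injEq]
    have h1 : (a + w) % 4294967295 ≡ a + w [MOD 4294967295] := Nat.mod_modEq _ _
    constructor
    · rw [Nat.mod_add_mod, pv_foldl_add t (0 + w)]
      ring_nf
    · have h2 : b + (a + w) % 4294967295 ≡ b + (a + w) [MOD 4294967295] :=
        (Nat.ModEq.refl b).add h1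
      have h3 : (b + (a + w) % 4294967295) % 4294967295 + t.length * ((a + w) % 4294967295) + pvW t
          ≡ b + (a + w) + t.length * (a + w) + pvW t [MOD 4294967295] :=
        ((Nat.mod_modEq _ _ |>.trans h2).add (h1.mul_left _)).add (Nat.ModEq.refl _)
      unfold Nat.ModEq at h3
      rw [h3]
      congr 1
      simp [pvW, List.length_cons]
      ring

-- ===== VERDICT (by name: the statement is the Claim_ definition above) =====
theorem fletcher64_spec : Claim_equal_fletcher64 := by
  intro data hdom
  unfold Spec_fletcher64 fletcher64 fletcher64_alt
  simp only []
  have hb : ∀ x ∈ pvBytes data, x < 256 := by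
    intro x hx
    simp only [pvBytes, List.mem_map] at hx
    obtain ⟨c, hc, rfl⟩ := hx
    simp only [Dom_fletcher64, pvDomStr, List.all_eq_true] at hdom
    have hd := hdom c hc
    simp only [pvDomChar, Bool.or_eq_true, Bool.and_eq_true, decide_eq_true_eq, beq_iff_eq] at hd
    omega
  rw [PySem.List.foldl_append_singleton_eq_map (pvWordA (pvBytes data)) _ [], List.nil_append]
  rw [List.map_congr_left (fun i hi => by
    obtain ⟨hlo, hhi, -⟩ := (PySem.List.mem_pyRange_iff_of_pos (by norm_num) i).mp hi
    exact pv_word_eq (pvBytes data) hb i hlo hhi)]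
  rw [pv_fold_pair _ 0 0 (by norm_num) (by norm_num)]
  rw [show (0 : Int) = ((0 : Nat) : Int) from rfl,
    pv_enumW _ 0 0 _ (by simp)]
  simp
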